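-- pv_equiv track=rewrite | github.com/Gpmarquesuk/FlashSoft | nodes/integrator.py | _extract_missing_modules
-- ===== SOURCE A (Python) =====
-- def _extract_missing_modules(output: str) -> set[str]:
--     misses: set[str] = set()
--     if not output:
--         return misses
--     markers = ["ModuleNotFoundError: No module named '", "ImportError: No module named '"]
--     for line in output.splitlines():
--         for marker in markers:
--             if marker in line:
--                 start = line.find(marker) + len(marker)
--                 end = line.find("'", start)
--                 if end > start:
--                     module = line[start:end].strip()
--                     if module:
--                         misses.add(module)
--     return misses
-- ===== SOURCE B (Python) =====
-- def _extract_missing_modules(output: str) -> set[str]: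
--     endings = ("ModuleNotFoundError: No module named ",
--                "ImportError: No module named ")
--     misses: set[str] = set()
--     for line in output.splitlines():
--         parts = line.split("'")
--         for before, name in zip(parts, parts[1:-1]):
--             if before.endswith(endings):
--                 name = name.strip()
--                 if name:
--                     misses.add(name)
--     return misses
-- ===== Notes on version B (the rewrite author's own statement) =====
-- stated objective: alternative
-- what changed: Instead of A's per-line search for each marker substring with find and index slicing, B tokenizes each line by splitting it on single quotes and zips adjacent segments, keeping the stripped segment whose predecessor ends with one of the two marker prefixes; Pre_ excludes outputs where one line contains ": No module named '" more than once, where A's first-match-per-marker extraction and its set insertion order are accidental (first-vs-all matches) and B keeps every match.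
import Mathlib
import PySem

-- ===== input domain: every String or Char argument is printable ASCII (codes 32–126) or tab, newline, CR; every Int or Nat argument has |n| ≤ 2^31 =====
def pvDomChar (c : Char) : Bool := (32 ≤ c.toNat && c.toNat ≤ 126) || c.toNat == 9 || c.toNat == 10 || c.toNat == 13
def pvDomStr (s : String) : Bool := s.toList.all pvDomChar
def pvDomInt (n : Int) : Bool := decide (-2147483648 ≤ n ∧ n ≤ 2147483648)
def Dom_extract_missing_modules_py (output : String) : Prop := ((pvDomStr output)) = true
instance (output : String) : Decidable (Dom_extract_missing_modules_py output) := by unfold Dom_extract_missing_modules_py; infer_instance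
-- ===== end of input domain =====

-- B tokenizes each line by splitting on single quotes and keeps a quoted segment whose
-- predecessor ends with an error-marker prefix, instead of A's per-marker substring
-- search with find and index slicing (objective: alternative).

-- ===== PORT A =====
def pvMarkers : List String :=
  ["ModuleNotFoundError: No module named '", "ImportError: No module named '"]

def extract_missing_modules_py (output : String) : List String :=
  -- misses: set[str] = set()
  let misses : PySem.Set String := PySem.Set.empty
  -- if not output: return misses
  if output = "" then misses else
  (PySem.Str.splitlines output).foldl (fun misses line =>
    pvMarkers.foldl (fun misses marker =>
      if PySem.Str.isIn marker line then
        let start : Int := PySem.Str.find line marker + (PySem.Str.len marker : Int)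
        let e : Int := PySem.Str.findFrom line "'" start
        if start < e then
          let module := PySem.Str.strip (PySem.Str.slice line (some start) (some e))
          if module ≠ "" then PySem.Set.add misses module else misses
        else misses
      else misses) misses) misses

-- ===== PORT B =====
-- the two marker prefixes WITHOUT their opening quote (Source B's `endings` tuple)
def pvEnd1 : List Char := "ModuleNotFoundError: No module named ".toList
def pvEnd2 : List Char := "ImportError: No module named ".toList

-- transliteration of Source B: split each line on "'", zip parts with parts[1:-1],
-- keep the stripped segment after a part ending with one of the two marker prefixes
def extract_missing_modules_py_alt (output : String) : List String :=
  (PySem.Str.splitlines output).foldl (fun misses line =>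
    let parts := PySem.Chars.splitOn line.toList ['\'']
    (parts.zip (PySem.List.slice parts (some 1) (some (-1)))).foldl (fun misses bn =>
      if PySem.Chars.endswith bn.1 pvEnd1 || PySem.Chars.endswith bn.1 pvEnd2 then
        let name := PySem.Chars.strip bn.2
        if name ≠ [] then PySem.Set.add misses (String.ofList name) else misses
      else misses) misses) PySem.Set.empty

-- ===== PRECONDITION & SPEC =====
-- the common tail of both markers, quote included
def pvSubM : List Char := ": No module named '".toList

-- Pre_ excludes outputs in which a single line contains the text ": No module named '"
-- more than once: on such lines A's first-match-per-marker extraction (and the resulting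
-- set insertion order) is accidental, while B collects every match — both defensible.
def Pre_extract_missing_modules_py (output : String) : Prop :=
  ∀ line ∈ PySem.Str.splitlines output, ∀ i < line.toList.length, ∀ j < line.toList.length,
    pvSubM <+: line.toList.drop i → pvSubM <+: line.toList.drop j → i = j
instance (output : String) : Decidable (Pre_extract_missing_modules_py output) := by
  unfold Pre_extract_missing_modules_py; infer_instance

def pvWitness_extract_missing_modules_py : String :=
  "ModuleNotFoundError: No module named 'foo'"

def Spec_extract_missing_modules_py (output : String) (out : List String) : Prop := out = extract_missing_modules_py_alt output
instance (output : String) (out : List String) : Decidable (Spec_extract_missing_modules_py output out) := by unfold Spec_extract_missing_modules_py; infer_instance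

-- ===== CLAIM (what is proved, stated in full; the proofs are below) =====
def Claim_equal_extract_missing_modules_py : Prop := ∀ (output : String), Dom_extract_missing_modules_py output → Pre_extract_missing_modules_py output → Spec_extract_missing_modules_py output (extract_missing_modules_py output)

-- ===== LEMMAS AND PROOFS =====

-- ---- A-side characterisation (find / findFrom / slice reduced to one Option per marker) ----

-- the text a line yields at position pos: up to the next quote, stripped
def pvModuleAt (line : List Char) (pos : Nat) : Option String :=
  let rest := line.drop pos
  let name := PySem.Chars.strip (rest.takeWhile (fun c => c != '\''))
  if '\'' ∈ rest ∧ name ≠ [] then some (String.ofList name) else none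

-- the module A extracts for one marker on one line, as an Option
def pvExtract (s m : List Char) : Option String :=
  if PySem.Chars.isIn m s then pvModuleAt s ((PySem.Chars.find s m).toNat + m.length) else none

lemma pvPrefix_lt_length {s m : List Char} (hm : m ≠ []) {j : Nat} (h : m <+: s.drop j) :
    j < s.length := by
  rcases h with ⟨t, ht⟩
  have hne : s.drop j ≠ [] := by
    intro h0
    rw [h0] at ht
    exact hm (List.append_eq_nil_iff.mp ht).1
  have := List.drop_eq_nil_iff.not.mp hne
  omega

-- first index of a single character c in rest, via takeWhile
lemma pvTakeWhile_first (rest : List Char) (c : Char) (hc : c ∈ rest) :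
    [c] <+: rest.drop ((rest.takeWhile (fun x => x != c)).length) ∧
      ∀ i, i < (rest.takeWhile (fun x => x != c)).length → ¬ [c] <+: rest.drop i := by
  induction rest with
  | nil => cases hc
  | cons r t ih =>
    by_cases hr : r = c
    · have hpredf : (r != c) = false := by simp [hr]
      have htw : List.takeWhile (fun x => x != c) (r :: t) = [] := by
        simp [hpredf]
      rw [htw]
      exact ⟨hr ▸ (⟨t, rfl⟩ : [r] <+: r :: t), fun i hi => by simp at hi⟩
    · have hct : c ∈ t := by cases hc with
        | head => exact absurd rfl hr
        | tail _ h => exact h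
      have hpred : (r != c) = true := by simp [hr]
      obtain ⟨hpre, hmin⟩ := ih hct
      constructor
      · simpa [List.takeWhile, hpred] using hpre
      · intro i hi
        rw [List.takeWhile] at hi
        simp only [hpred, List.length_cons] at hi
        cases i with
        | zero =>
          simp only [List.drop_zero]
          rintro ⟨u, hu⟩
          simp at hu
          exact hr hu.1.symm
        | succ i' =>
          simpa using hmin i' (by omega)

lemma pvFind_singleton (rest : List Char) (c : Char) (hc : c ∈ rest) :
    PySem.Chars.find rest [c] = ((rest.takeWhile (fun x => x != c)).length : Int) := by
  have hinf : [c] <:+: rest := (List.singleton_infix_iff c rest).mpr hc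
  have hne : PySem.Chars.find rest [c] ≠ -1 := (PySem.Chars.find_ne_neg_one_iff rest [c]).mpr hinf
  have hspec := PySem.Chars.findFrom_natCast_spec rest [c] 0 (by omega) (by simpa using hne)
  simp only [Nat.cast_zero] at hspec
  rw [PySem.Chars.findFrom_zero] at hspec
  obtain ⟨h0, hpre, hminf⟩ := hspec
  obtain ⟨hpreL, hminL⟩ := pvTakeWhile_first rest c hc
  set L := (rest.takeWhile (fun x => x != c)).length with hL
  have heq : (PySem.Chars.find rest [c]).toNat = L := by
    rcases lt_trichotomy (PySem.Chars.find rest [c]).toNat L with h | h | h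
    · exact absurd hpre (hminL _ h)
    · exact h
    · exact absurd hpreL (hminf _ (by omega) h)
  omega

set_option maxHeartbeats 1000000 in
lemma pvStepA_eq (line marker : String) (hm : marker.toList ≠ []) (misses : PySem.Set String) :
    (if PySem.Str.isIn marker line then
        let start : Int := PySem.Str.find line marker + (PySem.Str.len marker : Int)
        let e : Int := PySem.Str.findFrom line "'" start
        if start < e then
          let module := PySem.Str.strip (PySem.Str.slice line (some start) (some e))
          if module ≠ "" then PySem.Set.add misses module else misses
        else misses
      else misses)
    = match pvExtract line.toList marker.toList with
      | some name => PySem.Set.add misses name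
      | none => misses := by
  by_cases hin : PySem.Chars.isIn marker.toList line.toList = true
  · have hinS : PySem.Str.isIn marker line = true := by simpa using hin
    rw [if_pos hinS]
    dsimp only
    have hinf : marker.toList <:+: line.toList :=
      (PySem.Chars.isIn_iff_infix marker.toList line.toList).mp hin
    have hne : PySem.Chars.find line.toList marker.toList ≠ -1 :=
      (PySem.Chars.find_ne_neg_one_iff line.toList marker.toList).mpr hinf
    have hspec := PySem.Chars.findFrom_natCast_spec line.toList marker.toList 0 (by omega)
      (by simpa using hne)
    simp only [Nat.cast_zero] at hspec
    rw [PySem.Chars.findFrom_zero] at hspec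
    obtain ⟨h0, hpre, -⟩ := hspec
    set t := (PySem.Chars.find line.toList marker.toList).toNat with ht
    have hfind : PySem.Chars.find line.toList marker.toList = (t : Int) :=
      (Int.toNat_of_nonneg h0).symm
    have htlt : t < line.toList.length := pvPrefix_lt_length hm hpre
    have hk : t + marker.toList.length ≤ line.toList.length := by
      have := hpre.length_le
      simp only [List.length_drop] at this
      omega
    have hstart : PySem.Str.find line marker + (PySem.Str.len marker : Int)
        = ((t + marker.toList.length : Nat) : Int) := by
      have h1 : PySem.Str.find line marker = PySem.Chars.find line.toList marker.toList := by simp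
      have h2 : (PySem.Str.len marker : Int) = (marker.toList.length : Int) := by simp
      rw [h1, h2, hfind]
      push_cast
      ring
    rw [hstart]
    have hrhs : pvExtract line.toList marker.toList
        = pvModuleAt line.toList (t + marker.toList.length) := by
      simp [pvExtract, hin, ht]
    rw [hrhs]
    set k := t + marker.toList.length with hkdef
    set rest := line.toList.drop k with hrest
    have hfrS : PySem.Str.findFrom line "'" ((k : Nat) : Int)
        = PySem.Chars.findFrom line.toList ['\''] ((k : Nat) : Int) := by simp
    by_cases hq : '\'' ∈ rest
    · set L := (rest.takeWhile (fun x => x != '\'')).length with hL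
      have hgf : PySem.Chars.find rest ['\''] = (L : Int) := pvFind_singleton rest '\'' hq
      have hfr : PySem.Str.findFrom line "'" ((k : Nat) : Int) = ((k + L : Nat) : Int) := by
        rw [hfrS, PySem.Chars.findFrom_natCast line.toList ['\''] k hk]
        rw [← hrest, hgf]
        have : ¬ ((L : Int) = -1) := by omega
        simp only [this, if_false]
        push_cast
        ring
      rw [hfr]
      by_cases hLpos : 0 < L
      · have hlt : ((k : Nat) : Int) < ((k + L : Nat) : Int) := by push_cast; omega
        rw [if_pos hlt]
        have htake : rest.take L = rest.takeWhile (fun x => x != '\'') :=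
          (List.prefix_iff_eq_take.mp (List.takeWhile_prefix _)).symm
        have hmodl : (PySem.Str.strip (PySem.Str.slice line (some ((k : Nat) : Int))
            (some ((k + L : Nat) : Int)))).toList
            = PySem.Chars.strip (rest.takeWhile (fun x => x != '\'')) := by
          have hcast : ((k + L : Nat) : Int) = ((k : Nat) : Int) + ((L : Nat) : Int) := by
            push_cast; ring
          have hsl : (PySem.Str.slice line (some ((k : Nat) : Int))
              (some ((k + L : Nat) : Int))).toList
              = PySem.List.slice line.toList (some ((k : Nat) : Int))
                (some ((k + L : Nat) : Int)) := by simp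
          have : (PySem.Str.strip (PySem.Str.slice line (some ((k : Nat) : Int))
              (some ((k + L : Nat) : Int)))).toList
              = PySem.Chars.strip ((PySem.Str.slice line (some ((k : Nat) : Int))
                (some ((k + L : Nat) : Int))).toList) := by simp
          rw [this, hsl, hcast, PySem.List.slice_natCast_add, ← hrest, htake]
        set name := PySem.Chars.strip (rest.takeWhile (fun c => c != '\'')) with hname
        have hmod : PySem.Str.strip (PySem.Str.slice line (some ((k : Nat) : Int))
            (some ((k + L : Nat) : Int))) = String.ofList name := by
          exact hmodl ▸ (String.ofList_toList).symm
        rw [hmod]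
        have hpm : pvModuleAt line.toList k
            = (if '\'' ∈ rest ∧ name ≠ [] then some (String.ofList name) else none) := rfl
        rw [hpm]
        by_cases hnm : name = []
        · rw [if_neg (by simp [hnm] : ¬ (String.ofList name ≠ "")),
            if_neg (by simp [hnm] : ¬ ('\'' ∈ rest ∧ name ≠ []))]
        · have h1 : String.ofList name ≠ "" := by
            intro hcon
            exact hnm (by simpa using congrArg String.toList hcon)
          rw [if_pos h1, if_pos ⟨hq, hnm⟩]
      · -- L = 0 : empty capture, A skips, name is empty
        have hL0 : L = 0 := by omega
        rw [if_neg (by push_cast; omega : ¬ (((k : Nat) : Int) < ((k + L : Nat) : Int)))]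
        have hpm : pvModuleAt line.toList k
            = (if '\'' ∈ rest ∧ PySem.Chars.strip (rest.takeWhile (fun c => c != '\'')) ≠ []
                then some (String.ofList (PySem.Chars.strip (rest.takeWhile (fun c => c != '\''))))
                else none) := rfl
        rw [hpm]
        have htw : rest.takeWhile (fun c => c != '\'') = [] :=
          List.length_eq_zero_iff.mp (hL ▸ hL0 : (rest.takeWhile (fun x => x != '\'')).length = 0)
        rw [htw]
        have hstripnil : PySem.Chars.strip ([] : List Char) = [] := by decide
        simp [hstripnil]
    · -- no closing quote on the line
      have hninf : ¬ ['\''] <:+: rest := fun h => hq ((List.singleton_infix_iff _ _).mp h)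
      have hgf : PySem.Chars.find rest ['\''] = -1 :=
        (PySem.Chars.find_eq_neg_one_iff rest ['\'']).mpr hninf
      have hfr : PySem.Str.findFrom line "'" ((k : Nat) : Int) = -1 := by
        rw [hfrS, PySem.Chars.findFrom_natCast line.toList ['\''] k hk, ← hrest, hgf]
        simp
      rw [hfr]
      rw [if_neg (by omega : ¬ (((k : Nat) : Int) < -1))]
      have hpm : pvModuleAt line.toList k
          = (if '\'' ∈ rest ∧ PySem.Chars.strip (rest.takeWhile (fun c => c != '\'')) ≠ []
              then some (String.ofList (PySem.Chars.strip (rest.takeWhile (fun c => c != '\''))))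
              else none) := rfl
      rw [hpm, if_neg (by simp [hq] : ¬ ('\'' ∈ rest ∧ PySem.Chars.strip (rest.takeWhile (fun c => c != '\'')) ≠ []))]
  · have hinS : ¬ (PySem.Str.isIn marker line = true) := by simpa using hin
    rw [if_neg hinS]
    simp [pvExtract, hin]

-- ---- the quote-split structure: PySem.Chars.splitOn on a single quote ----

-- structural recursion equivalent of line.split("'")
def pvSplitq : List Char → List (List Char)
  | [] => [[]]
  | c :: t =>
    if c = '\'' then [] :: pvSplitq t
    else
      match pvSplitq t with
      | s :: ss => (c :: s) :: ss
      | [] => [[c]]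

lemma pvSplitq_ne_nil (l : List Char) : pvSplitq l ≠ [] := by
  cases l with
  | nil => simp [pvSplitq]
  | cons c t =>
    unfold pvSplitq
    by_cases hc : c = '\''
    · simp [hc]
    · simp only [hc, if_false]
      cases pvSplitq t <;> simp

lemma pvGo_eq (fuel : Nat) : ∀ (l cur : List Char) (acc : List (List Char)),
    l.length ≤ fuel →
    PySem.Chars.splitOn.go ['\''] fuel l cur acc
      = acc.reverse ++ (pvSplitq l).modifyHead (cur.reverse ++ ·) := by
  induction fuel with
  | zero =>
    intro l cur acc h
    have : l = [] := by
      cases l with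
      | nil => rfl
      | cons c t => simp at h
    subst this
    simp [PySem.Chars.splitOn.go, pvSplitq]
  | succ fuel ih =>
    intro l cur acc h
    cases l with
    | nil => simp [PySem.Chars.splitOn.go, pvSplitq]
    | cons c t =>
      rw [PySem.Chars.splitOn.go]
      by_cases hc : c = '\''
      · have hpre : List.isPrefixOf ['\''] (c :: t) = true := by
          simp [List.isPrefixOf, hc]
        rw [if_pos hpre]
        have hdrop : List.drop (List.length ['\'']) (c :: t) = t := by simp
        rw [hdrop, ih t [] (cur.reverse :: acc) (by simpa using Nat.le_of_succ_le_succ h)]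
        have hsp1 : pvSplitq (c :: t) = [] :: pvSplitq t := by simp [pvSplitq, hc]
        rw [hsp1]
        cases hsp : pvSplitq t with
        | nil => exact absurd hsp (pvSplitq_ne_nil t)
        | cons s ss => simp
      · have hpre : List.isPrefixOf ['\''] (c :: t) = false := by
          simp [List.isPrefixOf]
          exact fun hh => absurd hh.symm hc
        rw [if_neg (by simp [hpre])]
        rw [ih t (c :: cur) acc (by simpa using Nat.le_of_succ_le_succ h)]
        have hsp1 : pvSplitq (c :: t)
            = match pvSplitq t with
              | s :: ss => (c :: s) :: ss
              | [] => [[c]] := by simp [pvSplitq, hc]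
        rw [hsp1]
        cases hsp : pvSplitq t with
        | nil => exact absurd hsp (pvSplitq_ne_nil t)
        | cons s ss => simp

lemma pvSplitOn_eq (l : List Char) : PySem.Chars.splitOn l ['\''] = pvSplitq l := by
  unfold PySem.Chars.splitOn
  rw [pvGo_eq (l.length + 1) l [] [] (by omega)]
  cases hsp : pvSplitq l with
  | nil => exact absurd hsp (pvSplitq_ne_nil l)
  | cons s ss => simp

-- join with single-quote separators (the inverse of pvSplitq)
def pvJoin : List (List Char) → List Char
  | [] => []
  | [s] => s
  | s :: t :: ss => s ++ '\'' :: pvJoin (t :: ss)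

lemma pvJoin_splitq (l : List Char) : pvJoin (pvSplitq l) = l := by
  induction l with
  | nil => simp [pvSplitq, pvJoin]
  | cons c t ih =>
    unfold pvSplitq
    by_cases hc : c = '\''
    · simp only [hc, if_pos rfl]
      cases hsp : pvSplitq t with
      | nil => exact absurd hsp (pvSplitq_ne_nil t)
      | cons s ss =>
        rw [hsp] at ih
        simp [pvJoin, ih, hc]
    · simp only [hc, if_false]
      cases hsp : pvSplitq t with
      | nil => exact absurd hsp (pvSplitq_ne_nil t)
      | cons s ss =>
        rw [hsp] at ih
        cases ss with
        | nil => simp_all [pvJoin]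
        | cons u us => simp_all [pvJoin]

lemma pvSplitq_qfree (l : List Char) : ∀ p ∈ pvSplitq l, '\'' ∉ p := by
  induction l with
  | nil => simp [pvSplitq]
  | cons c t ih =>
    unfold pvSplitq
    by_cases hc : c = '\''
    · simp only [hc, if_pos rfl]
      intro p hp
      cases hp with
      | head => simp
      | tail _ h => exact ih p h
    · simp only [hc, if_false]
      cases hsp : pvSplitq t with
      | nil => exact absurd hsp (pvSplitq_ne_nil t)
      | cons s ss =>
        intro p hp
        cases hp with
        | head =>
          have hs : '\'' ∉ s := ih s (hsp ▸ List.mem_cons_self ..)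
          simp [hs]
          intro hcc
          exact absurd hcc.symm hc
        | tail _ h => exact ih p (hsp ▸ List.mem_cons_of_mem _ h)

-- ---- positions of the segments inside the joined line ----

-- start index of segment j inside pvJoin P
def pvPos (P : List (List Char)) (j : Nat) : Nat :=
  ((P.take j).map List.length).sum + j

lemma pvPos_cons (s : List Char) (P : List (List Char)) (j : Nat) :
    pvPos (s :: P) (j + 1) = s.length + 1 + pvPos P j := by
  simp [pvPos, List.take_succ_cons]
  omega

lemma pvPos_succ (P : List (List Char)) (j : Nat) (hj : j < P.length) :
    pvPos P (j + 1) = pvPos P j + (P[j]'hj).length + 1 := by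
  induction P generalizing j with
  | nil => simp at hj
  | cons s t ih =>
    cases j with
    | zero => simp [pvPos]
    | succ j' =>
      rw [pvPos_cons, pvPos_cons, ih j' (by simpa using Nat.lt_of_succ_lt_succ hj)]
      simp
      omega

lemma pvPos_lt_succ (P : List (List Char)) (j : Nat) : pvPos P j < pvPos P (j + 1) := by
  unfold pvPos
  have h1 : (P.take (j+1)).map List.length = (P.take j).map List.length ++ (P[j]?.toList).map List.length := by
    rw [List.take_succ, List.map_append]
  rw [h1, List.sum_append]
  omega

lemma pvPos_le (P : List (List Char)) {a b : Nat} (h : a ≤ b) : pvPos P a ≤ pvPos P b := by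
  induction h with
  | refl => exact le_refl _
  | step h ih => exact le_trans ih (le_of_lt (pvPos_lt_succ ..))

lemma pvDrop_append {α : Type} (x y : List α) (n : Nat) :
    (x ++ y).drop (x.length + n) = y.drop n := by
  induction x with
  | nil => simp
  | cons a t ih => simpa [Nat.succ_add] using ih

lemma pvDrop_append_le {α : Type} (x y : List α) (p : Nat) (h : p ≤ x.length) :
    (x ++ y).drop p = x.drop p ++ y := by
  induction x generalizing p with
  | nil =>
    have : p = 0 := by simpa using h
    simp [this]
  | cons a t ihx =>
    cases p with
    | zero => simp
    | succ q => simpa using ihx q (by simpa using Nat.le_of_succ_le_succ h)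

lemma pvJoin_cons_ne (s : List Char) (P : List (List Char)) (hP : P ≠ []) :
    pvJoin (s :: P) = s ++ '\'' :: pvJoin P := by
  cases P with
  | nil => exact absurd rfl hP
  | cons t ss => rfl

lemma pvJoin_drop (P : List (List Char)) (j : Nat) (hj : j < P.length) :
    (pvJoin P).drop (pvPos P j) = pvJoin (P.drop j) := by
  induction P generalizing j with
  | nil => simp at hj
  | cons s t ih =>
    cases j with
    | zero => simp [pvPos]
    | succ j' =>
      have hj' : j' < t.length := by simpa using Nat.lt_of_succ_lt_succ hj
      have ht : t ≠ [] := by intro h; rw [h] at hj'; simp at hj'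
      rw [pvJoin_cons_ne s t ht, pvPos_cons]
      have h1 : s ++ '\'' :: pvJoin t = (s ++ ['\'']) ++ pvJoin t := by simp
      have h2 : s.length + 1 + pvPos t j' = (s ++ ['\'']).length + pvPos t j' := by simp
      rw [h1, h2, pvDrop_append]
      simpa using ih j' hj'

-- an occurrence of body++quote arising from a segment suffix
lemma pvOcc_of_seg (P : List (List Char)) (body : List Char) (j : Nat)
    (hj : j + 1 < P.length) (hsuf : body <:+ P[j]'(Nat.lt_of_succ_lt hj)) :
    (body ++ ['\'']) <+:
      (pvJoin P).drop (pvPos P j + (P[j]'(Nat.lt_of_succ_lt hj)).length - body.length) := by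
  have hjlt : j < P.length := Nat.lt_of_succ_lt hj
  obtain ⟨u, hu⟩ := hsuf
  have hdropj : (pvJoin P).drop (pvPos P j) = pvJoin (P.drop j) := pvJoin_drop P j hjlt
  have hPdrop : P.drop j = (P[j]'hjlt) :: P.drop (j+1) := List.drop_eq_getElem_cons hjlt
  have hne : P.drop (j+1) ≠ [] := by rw [Ne, List.drop_eq_nil_iff]; omega
  have hjoin : pvJoin (P.drop j) = (P[j]'hjlt) ++ '\'' :: pvJoin (P.drop (j+1)) := by
    rw [hPdrop]; exact pvJoin_cons_ne _ _ hne
  have hlenu : u.length + body.length = (P[j]'hjlt).length := by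
    rw [← hu]; simp
  have harith : pvPos P j + (P[j]'hjlt).length - body.length = pvPos P j + u.length := by
    omega
  rw [harith]
  have hdd : (pvJoin P).drop (pvPos P j + u.length)
      = ((pvJoin P).drop (pvPos P j)).drop u.length := by
    rw [List.drop_drop]
  rw [hdd, hdropj, hjoin, ← hu]
  have hassoc : (u ++ body) ++ '\'' :: pvJoin (P.drop (j+1))
      = u ++ (body ++ '\'' :: pvJoin (P.drop (j+1))) := by simp
  rw [hassoc]
  have : (u ++ (body ++ '\'' :: pvJoin (P.drop (j+1)))).drop u.length
      = body ++ '\'' :: pvJoin (P.drop (j+1)) := by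
    simpa using pvDrop_append u (body ++ '\'' :: pvJoin (P.drop (j+1))) 0
  rw [this]
  exact ⟨pvJoin (P.drop (j+1)), by simp⟩

-- two quote-free blocks before the same first quote are equal
lemma pvQuote_block_eq {x y b v : List Char} (hq1 : '\'' ∉ x) (hq2 : '\'' ∉ b)
    (h : x ++ '\'' :: y = b ++ '\'' :: v) : x = b := by
  induction x generalizing b with
  | nil =>
    cases b with
    | nil => rfl
    | cons c bs =>
      injection h with h1 h2
      exact absurd (h1 ▸ List.mem_cons_self ..) hq2
  | cons a xs ih =>
    cases b with
    | nil =>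
      injection h with h1 h2
      exact absurd (h1 ▸ List.mem_cons_self ..) hq1
    | cons c bs =>
      injection h with h1 h2
      subst h1
      rw [ih (fun hm => hq1 (List.mem_cons_of_mem _ hm))
            (fun hm => hq2 (List.mem_cons_of_mem _ hm)) h2]

-- every occurrence of body++quote comes from a segment suffix
lemma pvSeg_of_occ (P : List (List Char)) (hP : ∀ p ∈ P, '\'' ∉ p)
    (body : List Char) (hqb : '\'' ∉ body) (p : Nat)
    (hocc : (body ++ ['\'']) <+: (pvJoin P).drop p) :
    ∃ j, ∃ (hj : j + 1 < P.length), body <:+ P[j]'(Nat.lt_of_succ_lt hj) ∧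
      p = pvPos P j + (P[j]'(Nat.lt_of_succ_lt hj)).length - body.length := by
  induction P generalizing p with
  | nil =>
    exfalso
    have := hocc.length_le
    simp [pvJoin] at this
  | cons s t ih =>
    by_cases ht : t = []
    · subst ht
      exfalso
      have hq : '\'' ∈ (pvJoin [s]).drop p := hocc.subset (by simp)
      have : '\'' ∈ s := List.mem_of_mem_drop (by simpa [pvJoin] using hq)
      exact hP s (List.mem_cons_self ..) this
    · have hjoin : pvJoin (s :: t) = s ++ '\'' :: pvJoin t := pvJoin_cons_ne s t ht
      by_cases hp : s.length + 1 ≤ p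
      · have hdrop : (pvJoin (s :: t)).drop p = (pvJoin t).drop (p - s.length - 1) := by
          rw [hjoin]
          have h1 : s ++ '\'' :: pvJoin t = (s ++ ['\'']) ++ pvJoin t := by simp
          rw [h1]
          conv_lhs => rw [show p = (s ++ ['\'']).length + (p - s.length - 1) by
            simp
            omega]
          rw [pvDrop_append]
        rw [hdrop] at hocc
        obtain ⟨j', hj', hsuf', hp'⟩ := ih (fun q hq => hP q (List.mem_cons_of_mem _ hq)) _ hocc
        have hlen' : body.length ≤ (t[j']'(Nat.lt_of_succ_lt hj')).length := hsuf'.length_le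
        refine ⟨j' + 1, by simpa using Nat.succ_lt_succ hj', by simpa using hsuf', ?_⟩
        rw [pvPos_cons]
        simp only [List.getElem_cons_succ]
        omega
      · push_neg at hp
        obtain ⟨v, hv⟩ := hocc
        rw [hjoin, pvDrop_append_le s _ p (by omega)] at hv
        have hv0 : body ++ '\'' :: v = s.drop p ++ '\'' :: pvJoin t := by simpa using hv
        have hv' : s.drop p ++ '\'' :: pvJoin t = body ++ '\'' :: v := hv0.symm
        have hqs : '\'' ∉ s.drop p := fun hm => hP s (List.mem_cons_self ..) (List.mem_of_mem_drop hm)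
        have hbs : s.drop p = body := pvQuote_block_eq hqs hqb hv'
        have hlen : s.length - p = body.length := by
          rw [← hbs]; simp
        have htl : 0 < t.length := List.length_pos_of_ne_nil ht
        refine ⟨0, by simpa using Nat.succ_lt_succ htl, ?_, ?_⟩
        · simpa using hbs ▸ List.drop_suffix p s
        · simp [pvPos]
          omega

lemma pvPos_end_mono (P : List (List Char)) (j1 j2 : Nat) (h1 : j1 < P.length)
    (h2 : j2 < P.length) (hlt : j1 < j2) :
    pvPos P j1 + (P[j1]'h1).length < pvPos P j2 + (P[j2]'h2).length := by
  have hs := pvPos_succ P j1 h1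
  have hle := pvPos_le P (show j1 + 1 ≤ j2 from hlt)
  omega

-- ---- uniqueness of the marker occurrence under Pre_ ----

def pvSubBody : List Char := ": No module named ".toList

def pvPreLine (l : List Char) : Prop :=
  ∀ i < l.length, ∀ j < l.length, pvSubM <+: l.drop i → pvSubM <+: l.drop j → i = j

lemma pvJ_unique (l : List Char) (hpre : pvPreLine l) (j1 j2 : Nat)
    (h1 : j1 + 1 < (pvSplitq l).length) (h2 : j2 + 1 < (pvSplitq l).length)
    (hm1 : pvEnd1 <:+ (pvSplitq l)[j1]'(Nat.lt_of_succ_lt h1)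
         ∨ pvEnd2 <:+ (pvSplitq l)[j1]'(Nat.lt_of_succ_lt h1))
    (hm2 : pvEnd1 <:+ (pvSplitq l)[j2]'(Nat.lt_of_succ_lt h2)
         ∨ pvEnd2 <:+ (pvSplitq l)[j2]'(Nat.lt_of_succ_lt h2)) :
    j1 = j2 := by
  have hsb1 : pvSubBody <:+ pvEnd1 := by decide
  have hsb2 : pvSubBody <:+ pvEnd2 := by decide
  have hsub1 : pvSubBody <:+ (pvSplitq l)[j1]'(Nat.lt_of_succ_lt h1) := by
    cases hm1 with
    | inl h => exact hsb1.trans h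
    | inr h => exact hsb2.trans h
  have hsub2 : pvSubBody <:+ (pvSplitq l)[j2]'(Nat.lt_of_succ_lt h2) := by
    cases hm2 with
    | inl h => exact hsb1.trans h
    | inr h => exact hsb2.trans h
  have hocc1 := pvOcc_of_seg (pvSplitq l) pvSubBody j1 h1 hsub1
  have hocc2 := pvOcc_of_seg (pvSplitq l) pvSubBody j2 h2 hsub2
  rw [pvJoin_splitq l] at hocc1 hocc2
  have hSM : pvSubM = pvSubBody ++ ['\''] := by decide
  rw [← hSM] at hocc1 hocc2
  have hne : pvSubM ≠ [] := by decide
  have hp1 := pvPrefix_lt_length hne hocc1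
  have hp2 := pvPrefix_lt_length hne hocc2
  have heq := hpre _ hp1 _ hp2 hocc1 hocc2
  have hl1 : pvSubBody.length ≤ ((pvSplitq l)[j1]'(Nat.lt_of_succ_lt h1)).length := hsub1.length_le
  have hl2 : pvSubBody.length ≤ ((pvSplitq l)[j2]'(Nat.lt_of_succ_lt h2)).length := hsub2.length_le
  by_contra hnejj
  rcases Nat.lt_or_ge j1 j2 with hlt | hge
  · have := pvPos_end_mono (pvSplitq l) j1 j2 (Nat.lt_of_succ_lt h1) (Nat.lt_of_succ_lt h2) hlt
    omega
  · have hlt2 : j2 < j1 := by omega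
    have := pvPos_end_mono (pvSplitq l) j2 j1 (Nat.lt_of_succ_lt h2) (Nat.lt_of_succ_lt h1) hlt2
    omega

lemma pvNot_both (P : List (List Char)) (j : Nat) (hj : j < P.length)
    (h1 : pvEnd1 <:+ P[j]'hj) (h2 : pvEnd2 <:+ P[j]'hj) : False := by
  have hr1 : pvEnd1.reverse <+: (P[j]'hj).reverse := List.reverse_prefix.mpr h1
  have hr2 : pvEnd2.reverse <+: (P[j]'hj).reverse := List.reverse_prefix.mpr h2
  have h21 : pvEnd2.reverse <+: pvEnd1.reverse :=
    List.prefix_of_prefix_length_le hr2 hr1 (by decide)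
  exact absurd (List.reverse_prefix.mp h21) (by decide)

-- ---- evaluating pvExtract through the segment structure ----

lemma pvTakeWhile_qfree (n : List Char) (h : '\'' ∉ n) :
    n.takeWhile (fun c => c != '\'') = n := by
  rw [List.takeWhile_eq_self_iff]
  intro x hx
  simp
  rintro rfl
  exact h hx

lemma pvTakeWhile_qfree_append (n t : List Char) (h : '\'' ∉ n) :
    (n ++ '\'' :: t).takeWhile (fun c => c != '\'') = n := by
  induction n with
  | nil => simp
  | cons c s ih =>
    have hcne : c ≠ '\'' := fun hcc => h (hcc ▸ List.mem_cons_self ..)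
    have hc : (c != '\'') = true := by simp [hcne]
    rw [List.cons_append, List.takeWhile_cons, hc]
    simp only [if_true]
    rw [ih (fun hm => h (List.mem_cons_of_mem _ hm))]

lemma pvExtract_eq_none (l body : List Char) (hqb : '\'' ∉ body)
    (hnone : ∀ j (hj : j + 1 < (pvSplitq l).length),
      ¬ body <:+ (pvSplitq l)[j]'(Nat.lt_of_succ_lt hj)) :
    pvExtract l (body ++ ['\'']) = none := by
  by_cases hin : PySem.Chars.isIn (body ++ ['\'']) l = true
  · exfalso
    obtain ⟨p, hp⟩ := (PySem.Chars.exists_prefix_drop_iff_isIn _ _).mpr hin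
    rw [← pvJoin_splitq l] at hp
    obtain ⟨j, hj, hsuf, -⟩ := pvSeg_of_occ (pvSplitq l) (pvSplitq_qfree l) body hqb p hp
    exact hnone j hj hsuf
  · unfold pvExtract
    rw [if_neg hin]

lemma pvExtract_eq_some (l body : List Char) (hqb : '\'' ∉ body)
    (j : Nat) (hj : j + 1 < (pvSplitq l).length)
    (hsuf : body <:+ (pvSplitq l)[j]'(Nat.lt_of_succ_lt hj))
    (huniq : ∀ j' (hj' : j' + 1 < (pvSplitq l).length),
      body <:+ (pvSplitq l)[j']'(Nat.lt_of_succ_lt hj') → j' = j) :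
    pvExtract l (body ++ ['\''])
      = if j + 2 < (pvSplitq l).length ∧ PySem.Chars.strip ((pvSplitq l)[j+1]'hj) ≠ []
        then some (String.ofList (PySem.Chars.strip ((pvSplitq l)[j+1]'hj)))
        else none := by
  have hjlt : j < (pvSplitq l).length := Nat.lt_of_succ_lt hj
  have hocc := pvOcc_of_seg (pvSplitq l) body j hj hsuf
  rw [pvJoin_splitq l] at hocc
  have hin : PySem.Chars.isIn (body ++ ['\'']) l = true :=
    (PySem.Chars.exists_prefix_drop_iff_isIn _ _).mp ⟨_, hocc⟩
  unfold pvExtract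
  rw [if_pos hin]
  have hinf : (body ++ ['\'']) <:+: l := (PySem.Chars.isIn_iff_infix _ _).mp hin
  have h0 : 0 ≤ PySem.Chars.find l (body ++ ['\'']) :=
    (PySem.Chars.find_nonneg_iff _ _).mpr hinf
  obtain ⟨hfpre, -⟩ := PySem.Chars.find_spec h0
  rw [← pvJoin_splitq l] at hfpre
  obtain ⟨j', hj', hsuf', hp'⟩ := pvSeg_of_occ (pvSplitq l) (pvSplitq_qfree l) body hqb _ hfpre
  have hjj : j' = j := huniq j' hj' hsuf'
  subst hjj
  rw [pvJoin_splitq l] at hp'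
  have hp2 : (PySem.Chars.find l (body ++ ['\''])).toNat
      = pvPos (pvSplitq l) j' + ((pvSplitq l)[j']'(Nat.lt_of_succ_lt hj)).length - body.length :=
    hp'
  have hblen : body.length ≤ ((pvSplitq l)[j']'(Nat.lt_of_succ_lt hj)).length := hsuf.length_le
  have hposnext : (PySem.Chars.find l (body ++ ['\''])).toNat + (body ++ ['\'']).length
      = pvPos (pvSplitq l) (j' + 1) := by
    rw [pvPos_succ (pvSplitq l) j' (Nat.lt_of_succ_lt hj)]
    simp only [List.length_append, List.length_cons, List.length_nil]
    omega
  rw [hposnext]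
  have hrest : l.drop (pvPos (pvSplitq l) (j' + 1)) = pvJoin ((pvSplitq l).drop (j' + 1)) := by
    have h := pvJoin_drop (pvSplitq l) (j' + 1) hj
    rw [pvJoin_splitq l] at h
    exact h
  have hPd : (pvSplitq l).drop (j' + 1)
      = ((pvSplitq l)[j'+1]'hj) :: (pvSplitq l).drop (j' + 2) := List.drop_eq_getElem_cons hj
  have hqf : '\'' ∉ ((pvSplitq l)[j'+1]'hj) :=
    pvSplitq_qfree l _ (List.getElem_mem hj)
  unfold pvModuleAt
  rw [hrest, hPd]
  dsimp only
  by_cases hk : j' + 2 < (pvSplitq l).length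
  · have hne2 : (pvSplitq l).drop (j' + 2) ≠ [] := by rw [Ne, List.drop_eq_nil_iff]; omega
    rw [pvJoin_cons_ne _ _ hne2]
    rw [pvTakeWhile_qfree_append _ _ hqf]
    have hqmem : '\'' ∈ ((pvSplitq l)[j'+1]'hj) ++ '\'' :: pvJoin ((pvSplitq l).drop (j' + 2)) := by
      simp
    by_cases hs : PySem.Chars.strip ((pvSplitq l)[j'+1]'hj) ≠ []
    · rw [if_pos ⟨hqmem, hs⟩, if_pos ⟨hk, hs⟩]
    · rw [if_neg (fun hcon => hs hcon.2), if_neg (fun hcon => hs hcon.2)]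
  · have hd2 : (pvSplitq l).drop (j' + 2) = [] := by rw [List.drop_eq_nil_iff]; omega
    rw [hd2]
    have hjs : pvJoin [((pvSplitq l)[j'+1]'hj)] = ((pvSplitq l)[j'+1]'hj) := rfl
    rw [hjs, pvTakeWhile_qfree _ hqf]
    rw [if_neg (fun hcon => hqf hcon.1), if_neg (fun hcon => hk hcon.1)]

-- ---- B-side: the zip-fold as a filterMap ----

def pvF (bn : List Char × List Char) : Option String :=
  if PySem.Chars.endswith bn.1 pvEnd1 || PySem.Chars.endswith bn.1 pvEnd2 then
    (if PySem.Chars.strip bn.2 ≠ []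
      then some (String.ofList (PySem.Chars.strip bn.2)) else none)
  else none

lemma pvFoldl_pvF : ∀ (xs : List (List Char × List Char)) (a : PySem.Set String),
    xs.foldl (fun misses bn =>
      if PySem.Chars.endswith bn.1 pvEnd1 || PySem.Chars.endswith bn.1 pvEnd2 then
        let name := PySem.Chars.strip bn.2
        if name ≠ [] then PySem.Set.add misses (String.ofList name) else misses
      else misses) a
      = (xs.filterMap pvF).foldl PySem.Set.add a := by
  intro xs
  induction xs with
  | nil => intro a; simp
  | cons x t ih =>
    intro a
    rw [List.foldl_cons, List.filterMap_cons]
    unfold pvF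
    dsimp only
    split_ifs with hA hB
    · dsimp only
      rw [List.foldl_cons]
      exact ih _
    · dsimp only
      exact ih a
    · dsimp only
      exact ih a

lemma pvSlice_one_negone {α : Type} (P : List α) :
    PySem.List.slice P (some 1) (some (-1)) = (P.drop 1).dropLast := by
  cases P with
  | nil => rfl
  | cons x t =>
    have ha : PySem.List.clampIdx (x :: t).length 1 = 1 := by
      unfold PySem.List.clampIdx
      simp
    have hb : PySem.List.clampIdx (x :: t).length (-1) = t.length := by
      unfold PySem.List.clampIdx
      simp
    show List.take (PySem.List.clampIdx (x :: t).length (-1)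
        - PySem.List.clampIdx (x :: t).length 1)
        (List.drop (PySem.List.clampIdx (x :: t).length 1) (x :: t)) = _
    rw [ha, hb]
    simp [List.dropLast_eq_take]

def pvPairs (P : List (List Char)) : List (List Char × List Char) :=
  P.zip ((P.drop 1).dropLast)

lemma pvPairs_length (P : List (List Char)) : (pvPairs P).length = P.length - 2 := by
  simp [pvPairs]
  omega

lemma pvPairs_getElem (P : List (List Char)) (i : Nat) (hi : i < (pvPairs P).length) :
    (pvPairs P)[i] = (P[i]'(by simp [pvPairs_length] at hi; omega),
                      P[i+1]'(by simp [pvPairs_length] at hi; omega)) := by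
  have hi2 : i < P.length - 2 := by simpa [pvPairs_length] using hi
  unfold pvPairs
  rw [List.getElem_zip]
  have h2 : ((P.drop 1).dropLast)[i]'(by simp; omega) = P[i+1]'(by omega) := by
    rw [List.getElem_dropLast, List.getElem_drop]
    simp [Nat.add_comm]
  simp only [h2]

lemma pvFilterMap_eq_nil {α β : Type} (f : α → Option β) (xs : List α)
    (h : ∀ i, (hi : i < xs.length) → f xs[i] = none) : xs.filterMap f = [] := by
  rw [List.filterMap_eq_nil_iff]
  intro a ha
  obtain ⟨i, hi, rfl⟩ := List.mem_iff_getElem.mp ha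
  exact h i hi

lemma pvFilterMap_single {α β : Type} (f : α → Option β) (xs : List α) (j : Nat)
    (hj : j < xs.length) (v : β) (hv : f xs[j] = some v)
    (hother : ∀ i, (hi : i < xs.length) → i ≠ j → f xs[i] = none) :
    xs.filterMap f = [v] := by
  induction xs generalizing j with
  | nil => simp at hj
  | cons x t ih =>
    cases j with
    | zero =>
      simp only [List.getElem_cons_zero] at hv
      rw [List.filterMap_cons, hv]
      have ht : t.filterMap f = [] := by
        apply pvFilterMap_eq_nil
        intro i hi
        exact hother (i+1) (by simpa using Nat.succ_lt_succ hi) (by omega)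
      simp [ht]
    | succ j' =>
      have hx : f x = none := hother 0 (by simp) (by omega)
      rw [List.filterMap_cons, hx]
      exact ih j' (by simpa using Nat.lt_of_succ_lt_succ hj) (by simpa using hv)
        (fun i hi hne => hother (i+1) (by simpa using Nat.succ_lt_succ hi) (by omega))

-- ---- the B-side filterMap, evaluated ----

lemma pvB_nil (l : List Char)
    (hn : ∀ j (hj : j + 1 < (pvSplitq l).length),
      ¬ (pvEnd1 <:+ (pvSplitq l)[j]'(Nat.lt_of_succ_lt hj)
        ∨ pvEnd2 <:+ (pvSplitq l)[j]'(Nat.lt_of_succ_lt hj))) :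
    (pvPairs (pvSplitq l)).filterMap pvF = [] := by
  apply pvFilterMap_eq_nil
  intro i hi
  have hi2 : i < (pvSplitq l).length - 2 := by rwa [pvPairs_length] at hi
  have hi1 : i + 1 < (pvSplitq l).length := by omega
  rw [pvPairs_getElem _ _ hi]
  unfold pvF
  rw [if_neg]
  intro hcond
  simp only [Bool.or_eq_true] at hcond
  rcases hcond with he | he
  · exact hn i hi1 (Or.inl ((PySem.Chars.endswith_iff _ _).mp he))
  · exact hn i hi1 (Or.inr ((PySem.Chars.endswith_iff _ _).mp he))

lemma pvB_eq (l : List Char) (hpre : pvPreLine l) (j : Nat)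
    (hj : j + 1 < (pvSplitq l).length)
    (hm : pvEnd1 <:+ (pvSplitq l)[j]'(Nat.lt_of_succ_lt hj)
        ∨ pvEnd2 <:+ (pvSplitq l)[j]'(Nat.lt_of_succ_lt hj)) :
    (pvPairs (pvSplitq l)).filterMap pvF
      = if j + 2 < (pvSplitq l).length ∧ PySem.Chars.strip ((pvSplitq l)[j+1]'hj) ≠ []
        then [String.ofList (PySem.Chars.strip ((pvSplitq l)[j+1]'hj))]
        else [] := by
  have huniq : ∀ j' (hj' : j' + 1 < (pvSplitq l).length),
      (pvEnd1 <:+ (pvSplitq l)[j']'(Nat.lt_of_succ_lt hj')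
        ∨ pvEnd2 <:+ (pvSplitq l)[j']'(Nat.lt_of_succ_lt hj')) → j' = j :=
    fun j' hj' hm' => pvJ_unique l hpre j' j hj' hj hm' hm
  have hc : (PySem.Chars.endswith ((pvSplitq l)[j]'(Nat.lt_of_succ_lt hj)) pvEnd1
      || PySem.Chars.endswith ((pvSplitq l)[j]'(Nat.lt_of_succ_lt hj)) pvEnd2) = true := by
    rcases hm with h | h <;> simp [(PySem.Chars.endswith_iff _ _).mpr h]
  have hother : ∀ i, (hi : i < (pvPairs (pvSplitq l)).length) → i ≠ j →
      pvF ((pvPairs (pvSplitq l))[i]) = none := by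
    intro i hi hne
    have hi2 : i < (pvSplitq l).length - 2 := by rwa [pvPairs_length] at hi
    have hi1 : i + 1 < (pvSplitq l).length := by omega
    rw [pvPairs_getElem _ _ hi]
    unfold pvF
    rw [if_neg]
    intro hcond
    simp only [Bool.or_eq_true] at hcond
    rcases hcond with he | he
    · exact hne (huniq i hi1 (Or.inl ((PySem.Chars.endswith_iff _ _).mp he)))
    · exact hne (huniq i hi1 (Or.inr ((PySem.Chars.endswith_iff _ _).mp he)))
  by_cases hk : j + 2 < (pvSplitq l).length
  · have hjpair : j < (pvPairs (pvSplitq l)).length := by rw [pvPairs_length]; omega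
    by_cases hs : PySem.Chars.strip ((pvSplitq l)[j+1]'hj) ≠ []
    · rw [if_pos ⟨hk, hs⟩]
      apply pvFilterMap_single pvF _ j hjpair
      · rw [pvPairs_getElem _ _ hjpair]
        unfold pvF
        dsimp only
        rw [if_pos hc, if_pos hs]
      · exact hother
    · rw [if_neg (fun hcon => hs hcon.2)]
      apply pvFilterMap_eq_nil
      intro i hi
      by_cases hij : i = j
      · subst hij
        rw [pvPairs_getElem _ _ hi]
        unfold pvF
        dsimp only
        rw [if_pos hc, if_neg hs]
      · exact hother i hi hij
  · rw [if_neg (fun hcon => hk hcon.1)]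
    apply pvFilterMap_eq_nil
    intro i hi
    apply hother i hi
    have hi2 : i < (pvSplitq l).length - 2 := by rwa [pvPairs_length] at hi
    omega

-- ---- the per-line equality ----

lemma pvLine_eq (line : String) (hpre : pvPreLine line.toList) (misses : PySem.Set String) :
    (pvMarkers.foldl (fun misses marker =>
      if PySem.Str.isIn marker line then
        let start : Int := PySem.Str.find line marker + (PySem.Str.len marker : Int)
        let e : Int := PySem.Str.findFrom line "'" start
        if start < e then
          let module := PySem.Str.strip (PySem.Str.slice line (some start) (some e))
          if module ≠ "" then PySem.Set.add misses module else misses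
        else misses
      else misses) misses)
    = (let parts := PySem.Chars.splitOn line.toList ['\'']
      (parts.zip (PySem.List.slice parts (some 1) (some (-1)))).foldl (fun misses bn =>
        if PySem.Chars.endswith bn.1 pvEnd1 || PySem.Chars.endswith bn.1 pvEnd2 then
          let name := PySem.Chars.strip bn.2
          if name ≠ [] then PySem.Set.add misses (String.ofList name) else misses
        else misses) misses) := by
  have hm1eq : ("ModuleNotFoundError: No module named '").toList = pvEnd1 ++ ['\''] := by decide
  have hm2eq : ("ImportError: No module named '").toList = pvEnd2 ++ ['\''] := by decide
  unfold pvMarkers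
  rw [List.foldl_cons, List.foldl_cons, List.foldl_nil]
  rw [pvStepA_eq line "ModuleNotFoundError: No module named '" (by decide) misses]
  rw [pvStepA_eq line "ImportError: No module named '" (by decide)]
  rw [hm1eq, hm2eq]
  simp only [pvSplitOn_eq, pvSlice_one_negone]
  rw [pvFoldl_pvF]
  have hpp : (pvSplitq line.toList).zip (((pvSplitq line.toList).drop 1).dropLast)
      = pvPairs (pvSplitq line.toList) := rfl
  rw [hpp]
  by_cases hex : ∃ j, ∃ (hj : j + 1 < (pvSplitq line.toList).length),
      (pvEnd1 <:+ (pvSplitq line.toList)[j]'(Nat.lt_of_succ_lt hj)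
        ∨ pvEnd2 <:+ (pvSplitq line.toList)[j]'(Nat.lt_of_succ_lt hj))
  · obtain ⟨j, hj, hm⟩ := hex
    rw [pvB_eq line.toList hpre j hj hm]
    have huniq : ∀ j' (hj' : j' + 1 < (pvSplitq line.toList).length),
        (pvEnd1 <:+ (pvSplitq line.toList)[j']'(Nat.lt_of_succ_lt hj')
          ∨ pvEnd2 <:+ (pvSplitq line.toList)[j']'(Nat.lt_of_succ_lt hj')) → j' = j :=
      fun j' hj' hm' => pvJ_unique line.toList hpre j' j hj' hj hm' hm
    cases hm with
    | inl hsuf =>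
      have he1 := pvExtract_eq_some line.toList pvEnd1 (by decide) j hj hsuf
        (fun j' hj' hs' => huniq j' hj' (Or.inl hs'))
      have he2 : pvExtract line.toList (pvEnd2 ++ ['\'']) = none := by
        apply pvExtract_eq_none line.toList pvEnd2 (by decide)
        intro j' hj' hs'
        have hjj := huniq j' hj' (Or.inr hs')
        subst hjj
        exact pvNot_both (pvSplitq line.toList) j' (Nat.lt_of_succ_lt hj') hsuf hs'
      rw [he1, he2]
      split_ifs <;> simp
    | inr hsuf =>
      have he2 := pvExtract_eq_some line.toList pvEnd2 (by decide) j hj hsuf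
        (fun j' hj' hs' => huniq j' hj' (Or.inr hs'))
      have he1 : pvExtract line.toList (pvEnd1 ++ ['\'']) = none := by
        apply pvExtract_eq_none line.toList pvEnd1 (by decide)
        intro j' hj' hs'
        have hjj := huniq j' hj' (Or.inl hs')
        subst hjj
        exact pvNot_both (pvSplitq line.toList) j' (Nat.lt_of_succ_lt hj') hs' hsuf
      rw [he1, he2]
      split_ifs <;> simp
  · have hn : ∀ j (hj : j + 1 < (pvSplitq line.toList).length),
        ¬ (pvEnd1 <:+ (pvSplitq line.toList)[j]'(Nat.lt_of_succ_lt hj)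
          ∨ pvEnd2 <:+ (pvSplitq line.toList)[j]'(Nat.lt_of_succ_lt hj)) :=
      fun j hj h => hex ⟨j, hj, h⟩
    have he1 : pvExtract line.toList (pvEnd1 ++ ['\'']) = none :=
      pvExtract_eq_none line.toList pvEnd1 (by decide)
        (fun j hj hs => hn j hj (Or.inl hs))
    have he2 : pvExtract line.toList (pvEnd2 ++ ['\'']) = none :=
      pvExtract_eq_none line.toList pvEnd2 (by decide)
        (fun j hj hs => hn j hj (Or.inr hs))
    rw [he1, he2, pvB_nil line.toList hn]
    rfl

-- ===== VERDICT (by name: the statement is the Claim_ definition above) =====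
theorem extract_missing_modules_py_spec : Claim_equal_extract_missing_modules_py := by
  intro output _ hpre
  unfold Spec_extract_missing_modules_py
  unfold extract_missing_modules_py extract_missing_modules_py_alt
  by_cases h0 : output = ""
  · have hsl : PySem.Str.splitlines "" = [] := by decide
    subst h0
    simp [hsl, PySem.Set.empty]
  · rw [if_neg h0]
    refine PySem.List.foldl_congr_mem _ _ _ _ ?_
    intro acc line hl
    beta_reduce
    exact pvLine_eq line (fun i hi j hj => hpre line hl i hi j hj) acc
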